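-- pv_equiv track=rewrite | github.com/Waterbootdev/abstract-puzzle-solver | generate_not_rotated.py | first_frame
-- ===== SOURCE A (Python) =====
-- from typing import List
--
-- def first_frame(current_rotated: List[bool], before: List[List[int]], frame_length:int):
--     current_not_rotated: List[int] = []
--
--     for index in range(frame_length):
--         if not current_rotated[index]:
--             current_not_rotated.append(index)
--             before.append(current_not_rotated.copy())
--         else:
--             before.append(current_not_rotated.copy())
--             before[-1].append(index)
--
--     del before[-1][0]
--
--     return current_not_rotated
-- ===== SOURCE B (Python) =====
-- def first_frame(current_rotated, before, frame_length):
--     # Return-value reimplementation: B walks the data itself with enumerate and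
--     # an early break, and does NOT reproduce A's in-place appends to `before`
--     # (nor A's quadratic prefix copying); equivalence is about the return value.
--     result = []
--     for index, rotated in enumerate(current_rotated):
--         if index >= frame_length:
--             break
--         if not rotated:
--             result.append(index)
--     return result
-- ===== Notes on version B (the rewrite author's own statement) =====
-- stated objective: alternative
-- what changed: B drops A's side-channel work entirely: instead of indexing range(frame_length), copying a growing accumulator into `before` at every step and deleting from its last entry, B makes one early-exit pass over current_rotated itself with enumerate and collects the not-rotated indices directly (return value only; `before` is not mutated).
import Mathlib
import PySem

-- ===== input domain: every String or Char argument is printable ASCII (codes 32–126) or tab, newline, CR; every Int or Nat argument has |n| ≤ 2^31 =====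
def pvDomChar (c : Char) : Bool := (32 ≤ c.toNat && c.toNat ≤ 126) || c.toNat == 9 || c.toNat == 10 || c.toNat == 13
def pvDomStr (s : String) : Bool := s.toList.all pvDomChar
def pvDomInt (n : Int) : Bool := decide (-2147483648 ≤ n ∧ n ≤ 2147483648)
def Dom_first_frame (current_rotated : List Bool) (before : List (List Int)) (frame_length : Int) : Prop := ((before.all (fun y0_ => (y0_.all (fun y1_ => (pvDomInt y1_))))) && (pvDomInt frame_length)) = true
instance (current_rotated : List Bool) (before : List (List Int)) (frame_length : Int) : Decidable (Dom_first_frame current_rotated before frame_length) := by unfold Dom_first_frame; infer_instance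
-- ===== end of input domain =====

-- B makes one early-exit pass over current_rotated itself (no quadratic prefix
-- copying) and does NOT reproduce A's in-place appends to `before`: the
-- equivalence proved here is about the RETURN value only.

-- ===== PORT A =====
-- Loop threads (current_not_rotated, before); current_rotated[index] via pyGet?
-- (none = IndexError, excluded by Pre_). The final `del before[-1][0]` does not
-- affect the returned list (all appends to `before` are copies).
def first_frame (current_rotated : List Bool) (before : List (List Int)) (frame_length : Int) : List Int :=
  (((PySem.List.pyRange 0 frame_length 1).foldl
    (fun (s : List Int × List (List Int)) index =>
      match PySem.List.pyGet? current_rotated index with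
      | some b =>
          if !b then (s.1 ++ [index], s.2 ++ [s.1 ++ [index]])
          else (s.1, s.2 ++ [s.1 ++ [index]])
      | none => s)  -- IndexError: outside Pre_
    ([], before)).1)

-- ===== PORT B =====
-- Source B's `for index, rotated in enumerate(current_rotated): if index >= frame_length: break …`
-- as the obvious structural recursion over the list with the running index.
def firstFrameAltGo (frame_length : Int) : List Bool → Int → List Int
  | [], _ => []
  | rotated :: rest, index =>
      if frame_length ≤ index then []    -- break
      else if !rotated then index :: firstFrameAltGo frame_length rest (index + 1)
      else firstFrameAltGo frame_length rest (index + 1)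

def first_frame_alt (current_rotated : List Bool) (before : List (List Int)) (frame_length : Int) : List Int :=
  firstFrameAltGo frame_length current_rotated 0

-- ===== PRECONDITION & SPEC =====
-- Pre_ excludes exactly the inputs where A raises IndexError: an index reaching
-- past current_rotated, or `del before[-1][0]` with no nonempty last list.
def Pre_first_frame (current_rotated : List Bool) (before : List (List Int)) (frame_length : Int) : Prop :=
  frame_length ≤ (current_rotated.length : Int) ∧
    (1 ≤ frame_length ∨ (before.getLast?.getD []) ≠ [])
instance (current_rotated : List Bool) (before : List (List Int)) (frame_length : Int) : Decidable (Pre_first_frame current_rotated before frame_length) := by unfold Pre_first_frame; infer_instance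

def pvWitness_first_frame : List Bool × List (List Int) × Int := ([false, true, false], [], 3)

def Spec_first_frame (current_rotated : List Bool) (before : List (List Int)) (frame_length : Int) (out : List Int) : Prop := out = first_frame_alt current_rotated before frame_length
instance (current_rotated : List Bool) (before : List (List Int)) (frame_length : Int) (out : List Int) : Decidable (Spec_first_frame current_rotated before frame_length out) := by unfold Spec_first_frame; infer_instance

-- ===== CLAIM (what is proved, stated in full; the proofs are below) =====
def Claim_equal_first_frame : Prop := ∀ (current_rotated : List Bool) (before : List (List Int)) (frame_length : Int), Dom_first_frame current_rotated before frame_length → Pre_first_frame current_rotated before frame_length → Spec_first_frame current_rotated before frame_length (first_frame current_rotated before frame_length)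


-- ===== LEMMAS AND PROOFS =====

-- The first component of A's fold over any index list is the accumulator extended
-- by exactly the not-rotated indices of the list.
theorem first_frame_fold_fst (current_rotated : List Bool) :
    ∀ (l : List Int) (s : List Int × List (List Int)),
      (l.foldl
        (fun (s : List Int × List (List Int)) index =>
          match PySem.List.pyGet? current_rotated index with
          | some b =>
              if !b then (s.1 ++ [index], s.2 ++ [s.1 ++ [index]])
              else (s.1, s.2 ++ [s.1 ++ [index]])
          | none => s) s).1
      = s.1 ++ l.filter (fun i => !((PySem.List.pyGet? current_rotated i).getD true)) := by
  intro l
  induction l with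
  | nil => intro s; simp
  | cons i t ih =>
    intro s
    simp only [List.foldl_cons, List.filter_cons]
    cases h : PySem.List.pyGet? current_rotated i with
    | none => rw [ih]; simp
    | some b =>
      cases b with
      | false => rw [ih]; simp
      | true => rw [ih]; simp

-- B's early-exit walk from position i equals A's filtered index range [i, fl),
-- as long as fl does not reach past the end of the list.
theorem altGo_eq_filter (cr : List Bool) (fl : Int) (hfl : fl ≤ (cr.length : Int)) :
    ∀ (xs : List Bool) (i : Nat), xs = cr.drop i →
      firstFrameAltGo fl xs (i : Int)
        = (PySem.List.pyRange (i : Int) fl 1).filter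
            (fun j => !((PySem.List.pyGet? cr j).getD true)) := by
  intro xs
  induction xs with
  | nil =>
    intro i hdrop
    have hlen : cr.length ≤ i := by
      by_contra h
      have := List.drop_eq_nil_iff.mp hdrop.symm
      omega
    rw [PySem.List.pyRange_one_eq_nil (by exact_mod_cast le_trans hfl (by exact_mod_cast hlen))]
    simp [firstFrameAltGo]
  | cons r rest ih =>
    intro i hdrop
    have hi : i < cr.length := by
      by_contra h
      have hnil : cr.drop i = [] := List.drop_eq_nil_iff.mpr (by omega)
      rw [hnil] at hdrop; exact (List.cons_ne_nil r rest) hdrop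
    have hget : cr[i]? = some r := by
      have h : (cr.drop i)[(0 : Nat)]? = cr[i + 0]? := List.getElem?_drop
      rw [← hdrop] at h
      simpa using h.symm
    have hpy : PySem.List.pyGet? cr (i : Int) = some r := by
      rw [PySem.List.pyGet?_natCast, hget]
    have hrest : rest = cr.drop (i + 1) := by
      have h : (cr.drop i).tail = cr.drop (i + 1) := by rw [List.tail_drop]
      rw [← hdrop] at h
      simpa using h
    by_cases hle : fl ≤ (i : Int)
    · rw [PySem.List.pyRange_one_eq_nil hle]
      simp [firstFrameAltGo, hle]
    · rw [not_le] at hle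
      rw [PySem.List.pyRange_one_cons hle, List.filter_cons]
      have ihr := ih (i + 1) hrest
      push_cast at ihr
      cases r with
      | false => simp [firstFrameAltGo, not_le.mpr hle, hpy, ihr]
      | true => simp [firstFrameAltGo, not_le.mpr hle, hpy, ihr]

-- ===== VERDICT (by name: the statement is the Claim_ definition above) =====
theorem first_frame_spec : Claim_equal_first_frame := by
  intro current_rotated before frame_length _ hpre
  unfold Spec_first_frame first_frame first_frame_alt
  rw [first_frame_fold_fst current_rotated (PySem.List.pyRange 0 frame_length 1) ([], before)]
  have := altGo_eq_filter current_rotated frame_length hpre.1 current_rotated 0 (by simp)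
  simpa using this.symm
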